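-- pv_equiv track=rewrite | github.com/detiuaveiro/trabalho-de-grupo-pacman-82783 | client.py | smaller_cost
-- ===== SOURCE A (Python) =====
-- def calc_dist(item1, item2):
--     if item2==[] or item2 == None:          #default, if item 2 has no value
--         return 5000                         #obs: item one is always the pacman, always valide
--     return int( (abs(item1[0]-item2[0])**2) + (abs(item1[1]-item2[1])**2))
--
-- def smaller_index(vector):
--     index = 0
--     for i in range(len(vector)):
--         if vector[i] < vector[index]:
--             index = i
--     return index
--
-- def smaller_cost(pacman, vector, map_coast = {}):
--     if len(vector) > 80:        #assert max len as 80
--         vector=vector[0:80]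
--
--     if vector == []:
--         return
--
--     coast_lst = [0]*len(vector)
--
--     for i in range(len(vector)):            #assign the coast to every position in the vector
--         if tuple(vector[i]) in map_coast:
--             coast = map_coast[tuple(vector[i])]
--         else:
--             coast=1
--         coast_lst[i] = calc_dist(pacman,vector[i])*coast
--
--     return vector[smaller_index(coast_lst)]
-- ===== SOURCE B (Python) =====
-- def calc_dist(item1, item2):
--     if item2 == [] or item2 is None:
--         return 5000
--     return int((abs(item1[0] - item2[0]) ** 2) + (abs(item1[1] - item2[1]) ** 2))
--
--
-- def smaller_cost(pacman, vector, map_coast={}):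
--     vector = vector[:80]
--     if not vector:
--         return None
--     # Stable sort by weighted squared distance, then take the head: stability
--     # guarantees the FIRST element attaining the minimal cost, exactly A's
--     # first-minimum tie behaviour.
--     ordered = sorted(vector,
--                      key=lambda v: calc_dist(pacman, v) * map_coast.get(tuple(v), 1))
--     return ordered[0]
-- ===== Notes on version B (the rewrite author's own statement) =====
-- stated objective: alternative
-- what changed: Instead of filling a parallel cost table and scanning it with a separate smaller_index argmin helper, B stably sorts the (truncated) vector by the fused cost key and returns the head of the sorted list; stability of Python's sort reproduces A's first-minimum tie behaviour.
import Mathlib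
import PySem

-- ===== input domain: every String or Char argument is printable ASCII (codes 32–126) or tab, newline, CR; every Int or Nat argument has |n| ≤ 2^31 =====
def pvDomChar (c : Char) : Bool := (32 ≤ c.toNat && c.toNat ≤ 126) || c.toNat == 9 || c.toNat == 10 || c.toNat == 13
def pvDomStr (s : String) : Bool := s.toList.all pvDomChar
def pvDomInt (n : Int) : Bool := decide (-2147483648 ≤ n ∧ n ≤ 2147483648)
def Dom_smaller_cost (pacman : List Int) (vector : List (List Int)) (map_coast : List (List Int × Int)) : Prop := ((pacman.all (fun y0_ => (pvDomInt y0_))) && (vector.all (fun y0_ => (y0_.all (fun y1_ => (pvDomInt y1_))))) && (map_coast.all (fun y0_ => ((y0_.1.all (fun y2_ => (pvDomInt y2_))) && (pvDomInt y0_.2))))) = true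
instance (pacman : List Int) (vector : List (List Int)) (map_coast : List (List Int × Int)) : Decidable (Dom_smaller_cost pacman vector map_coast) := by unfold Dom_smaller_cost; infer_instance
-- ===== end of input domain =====

-- B replaces A's two-pass scheme (cost table + separate smaller_index argmin scan) by a stable
-- sort on the fused cost key followed by taking the head (alternative algorithm, same return
-- value; neither version mutates its arguments).

-- ===== PORT A =====
-- calc_dist, shared helper of Source A and Source B (both modules define it identically).
-- The Python branch 'item2 == None' can never hold for a list-typed argument and has no counterpart;
-- 'int(...)' of an int is the identity; the element lookups are exact under Pre_smaller_cost.
def calc_dist (item1 : List Int) (item2 : List Int) : Int :=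
  if item2 = [] then 5000
  else (|PySem.List.pyGetD item1 0 0 - PySem.List.pyGetD item2 0 0|) ^ 2 +
       (|PySem.List.pyGetD item1 1 0 - PySem.List.pyGetD item2 1 0|) ^ 2

def smaller_index (vector : List Int) : Int :=
  (PySem.List.pyRange 0 vector.length 1).foldl
    (fun index i =>
      if PySem.List.pyGetD vector i 0 < PySem.List.pyGetD vector index 0 then i else index)
    0

def smaller_cost (pacman : List Int) (vector : List (List Int)) (map_coast : List (List Int × Int)) : Option (List Int) :=
  let vector' := if vector.length > 80 then PySem.List.slice vector (some 0) (some 80) else vector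
  if vector' = [] then none
  else
    let coast_lst : List Int := List.replicate vector'.length 0
    let coast_lst :=
      (PySem.List.pyRange 0 vector'.length 1).foldl
        (fun cl i =>
          PySem.List.pySetD cl i
            (calc_dist pacman (PySem.List.pyGetD vector' i []) *
              (match PySem.Dict.get? (PySem.Dict.mk map_coast) (PySem.List.pyGetD vector' i []) with
               | some c => c
               | none => 1)))
        coast_lst
    some (PySem.List.pyGetD vector' (smaller_index coast_lst) [])

-- ===== PORT B =====
def smaller_cost_alt (pacman : List Int) (vector : List (List Int)) (map_coast : List (List Int × Int)) : Option (List Int) :=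
  let vector' := PySem.List.slice vector none (some 80)
  if vector' = [] then none
  else
    let ordered :=
      PySem.List.sorted vector'
        (fun v => calc_dist pacman v * PySem.Dict.getD (PySem.Dict.mk map_coast) v 1) false
    PySem.List.pyGet? ordered 0   -- ordered[0]; some _ since vector' ≠ []

-- ===== PRECONDITION & SPEC =====
-- Pre_ excludes exactly the inputs on which the Python A raises IndexError: a (first-80) element of
-- length 1, or some nonempty (first-80) element while pacman has fewer than two coordinates.
def Pre_smaller_cost (pacman : List Int) (vector : List (List Int)) (map_coast : List (List Int × Int)) : Prop :=
  (∀ v ∈ vector.take 80, v = [] ∨ 2 ≤ v.length) ∧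
  (2 ≤ pacman.length ∨ ∀ v ∈ vector.take 80, v = [])
instance (pacman : List Int) (vector : List (List Int)) (map_coast : List (List Int × Int)) : Decidable (Pre_smaller_cost pacman vector map_coast) := by unfold Pre_smaller_cost; infer_instance

def pvWitness_smaller_cost : List Int × List (List Int) × (List (List Int × Int)) :=
  ([0, 0], [[1, 2], [3, 4]], [([1, 2], 3)])

def Spec_smaller_cost (pacman : List Int) (vector : List (List Int)) (map_coast : List (List Int × Int)) (out : Option (List Int)) : Prop := out = smaller_cost_alt pacman vector map_coast
instance (pacman : List Int) (vector : List (List Int)) (map_coast : List (List Int × Int)) (out : Option (List Int)) : Decidable (Spec_smaller_cost pacman vector map_coast out) := by unfold Spec_smaller_cost; infer_instance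

-- ===== CLAIM (what is proved, stated in full; the proofs are below) =====
def Claim_equal_smaller_cost : Prop := ∀ (pacman : List Int) (vector : List (List Int)) (map_coast : List (List Int × Int)), Dom_smaller_cost pacman vector map_coast → Pre_smaller_cost pacman vector map_coast → Spec_smaller_cost pacman vector map_coast (smaller_cost pacman vector map_coast)

-- ===== LEMMAS AND PROOFS =====

-- truncation: both ports first reduce the vector to its first 80 entries
lemma pv_truncA (vector : List (List Int)) :
    (if vector.length > 80 then PySem.List.slice vector (some 0) (some 80) else vector) = vector.take 80 := by
  by_cases h : vector.length > 80
  · rw [if_pos h, PySem.List.slice_zero_start,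
      PySem.List.slice_to vector (by norm_num : (0 : Int) ≤ 80)]
    rfl
  · rw [if_neg h, List.take_of_length_le (by omega)]

lemma pv_truncB (vector : List (List Int)) :
    PySem.List.slice vector none (some 80) = vector.take 80 := by
  rw [PySem.List.slice_to vector (by norm_num : (0 : Int) ≤ 80)]
  rfl

-- the cost-table fill loop is a map
lemma pv_pySetD_natCast (xs : List Int) (k : Nat) (v : Int) (h : k < xs.length) :
    PySem.List.pySetD xs (k : Int) v = xs.set k v := by
  simp [PySem.List.pySetD, PySem.List.pySet?, PySem.List.pyIdx?, h]

lemma pv_fill_core (g : Nat → Int) (il : List Nat) :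
    ∀ (cl : List Int), (∀ k ∈ il, k < cl.length) →
      il.foldl (fun (cl : List Int) (k : Nat) => PySem.List.pySetD cl (k : Int) (g k)) cl =
        il.foldl (fun cl k => cl.set k (g k)) cl := by
  induction il with
  | nil => intro cl _; rfl
  | cons k t ih =>
    intro cl h
    simp only [List.foldl_cons]
    rw [pv_pySetD_natCast _ _ _ (h k (by simp))]
    exact ih _ (by intro j hj; rw [List.length_set]; exact h j (by simp [hj]))

lemma pv_set_fill_aux (g : Nat → Int) (m : Nat) :
    ∀ (n : Nat), n ≤ m →
      (List.range n).foldl (fun cl k => cl.set k (g k)) (List.replicate m (0 : Int)) =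
        (List.range n).map (fun k => g k) ++ List.replicate (m - n) 0 := by
  intro n
  induction n with
  | zero => simp
  | succ n ih =>
    intro h
    rw [List.range_succ, List.foldl_append, ih (by omega)]
    simp only [List.foldl_cons, List.foldl_nil]
    rw [List.set_append]
    have hn : ¬ n < ((List.range n).map (fun k => g k)).length := by simp
    rw [if_neg hn]
    have hrep : m - n = (m - (n + 1)) + 1 := by omega
    simp [hrep, List.replicate_succ]

lemma pv_fill_map (g : Int → Int) (n : Nat) :
    (PySem.List.pyRange 0 (n : Int) 1).foldl
        (fun cl i => PySem.List.pySetD cl i (g i)) (List.replicate n (0 : Int)) =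
      (List.range n).map (fun (k : Nat) => g (k : Int)) := by
  rw [PySem.List.pyRange_zero_natCast, List.foldl_map,
    pv_fill_core (fun k => g (k : Int)) (List.range n) (List.replicate n 0)
      (by simp [List.mem_range])]
  simpa using pv_set_fill_aux (fun k => g (k : Int)) n n le_rfl

-- the cost table of port A is the map of the fused cost function
lemma pv_tablefix (pacman : List Int) (D : PySem.Dict (List Int) Int) (l : List (List Int)) :
    (PySem.List.pyRange 0 (l.length : Int) 1).foldl
        (fun cl i =>
          PySem.List.pySetD cl i
            (calc_dist pacman (PySem.List.pyGetD l i []) *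
              (match PySem.Dict.get? D (PySem.List.pyGetD l i []) with
               | some c => c
               | none => 1)))
        (List.replicate l.length 0) =
      l.map (fun w => calc_dist pacman w * PySem.Dict.getD D w 1) := by
  rw [pv_fill_map (fun i =>
    calc_dist pacman (PySem.List.pyGetD l i []) *
      (match PySem.Dict.get? D (PySem.List.pyGetD l i []) with
       | some c => c
       | none => 1))]
  apply List.ext_getElem
  · simp
  · intro i h1 h2
    have hi : i < l.length := by simpa using h2
    simp only [List.getElem_map, List.getElem_range, PySem.List.pyGetD_natCast]
    rw [List.getD_eq_getElem l [] hi]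
    cases hD : PySem.Dict.get? D l[i] <;> simp [PySem.Dict.getD, hD]

-- smaller_index is the cast of a Nat-indexed first-argmin fold
def pvNatIdx (c : List Int) : Nat :=
  (List.range c.length).foldl (fun j k => if c.getD k 0 < c.getD j 0 then k else j) 0

lemma pv_smidx_core (c : List Int) (il : List Nat) :
    ∀ (j : Nat),
      il.foldl (fun (x : Int) (k : Nat) =>
          if PySem.List.pyGetD c (k : Int) 0 < PySem.List.pyGetD c x 0 then (k : Int) else x) (j : Int) =
        ((il.foldl (fun j k => if c.getD k 0 < c.getD j 0 then k else j) j : Nat) : Int) := by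
  induction il with
  | nil => intro j; rfl
  | cons k t ih =>
    intro j
    simp only [List.foldl_cons]
    rw [PySem.List.pyGetD_natCast c k 0, PySem.List.pyGetD_natCast c j 0]
    by_cases h : c.getD k 0 < c.getD j 0
    · simp only [if_pos h]; exact ih k
    · simp only [if_neg h]; exact ih j

lemma pv_smaller_index_eq (c : List Int) : smaller_index c = ((pvNatIdx c : Nat) : Int) := by
  unfold smaller_index pvNatIdx
  rw [PySem.List.pyRange_zero_natCast, List.foldl_map]
  simpa using pv_smidx_core c (List.range c.length) 0

lemma pv_idx_core_bound (c : List Int) (il : List Nat) :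
    ∀ (j : Nat), (∀ k ∈ il, k < c.length) → j < c.length →
      il.foldl (fun j k => if c.getD k 0 < c.getD j 0 then k else j) j < c.length := by
  induction il with
  | nil => intro j _ hj; exact hj
  | cons k t ih =>
    intro j h hj
    simp only [List.foldl_cons]
    by_cases hc : c.getD k 0 < c.getD j 0
    · rw [if_pos hc]; exact ih _ (fun x hx => h x (by simp [hx])) (h k (by simp))
    · rw [if_neg hc]; exact ih _ (fun x hx => h x (by simp [hx])) hj

lemma pv_pvNatIdx_lt (c : List Int) (h : c ≠ []) : pvNatIdx c < c.length := by
  unfold pvNatIdx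
  exact pv_idx_core_bound c _ 0 (by simp [List.mem_range]) (List.length_pos_iff.2 h)

lemma pv_idx_core_pref (c : List Int) (y : Int) (il : List Nat) :
    ∀ (j : Nat), (∀ k ∈ il, k < c.length) → j < c.length →
      il.foldl (fun j k => if (c ++ [y]).getD k 0 < (c ++ [y]).getD j 0 then k else j) j =
        il.foldl (fun j k => if c.getD k 0 < c.getD j 0 then k else j) j := by
  induction il with
  | nil => intro j _ _; rfl
  | cons k t ih =>
    intro j h hj
    have hk : k < c.length := h k (by simp)
    simp only [List.foldl_cons]
    rw [List.getD_append _ _ _ _ hk, List.getD_append _ _ _ _ hj]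
    by_cases hc : c.getD k 0 < c.getD j 0
    · simp only [if_pos hc]; exact ih _ (fun x hx => h x (by simp [hx])) hk
    · simp only [if_neg hc]; exact ih _ (fun x hx => h x (by simp [hx])) hj

lemma pv_pvNatIdx_append (c : List Int) (y : Int) (hc : c ≠ []) :
    pvNatIdx (c ++ [y]) = if y < c.getD (pvNatIdx c) 0 then c.length else pvNatIdx c := by
  unfold pvNatIdx
  have hlen : (c ++ [y]).length = c.length + 1 := by simp
  rw [hlen, List.range_succ, List.foldl_append,
    pv_idx_core_pref c y _ 0 (by simp [List.mem_range]) (List.length_pos_iff.2 hc)]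
  simp only [List.foldl_cons, List.foldl_nil]
  have hidx : (List.range c.length).foldl (fun j k => if c.getD k 0 < c.getD j 0 then k else j) 0 < c.length :=
    pv_idx_core_bound c _ 0 (by simp [List.mem_range]) (List.length_pos_iff.2 hc)
  rw [List.getD_append _ _ _ _ hidx, List.getD_append_right _ _ _ _ (le_refl c.length)]
  simp

lemma pv_argmin (f : List Int → Int) (b : List Int) (vs : List (List Int)) :
    (b :: vs).getD (pvNatIdx ((b :: vs).map f)) [] =
      vs.foldl (fun best w => if f w < f best then w else best) b := by
  induction vs using List.reverseRecOn with
  | nil => simp [pvNatIdx, List.range_succ]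
  | append_singleton ws x ih =>
    have hmap : (b :: (ws ++ [x])).map f = ((b :: ws).map f) ++ [f x] := by simp
    have hne : (b :: ws).map f ≠ [] := by simp
    have hlt : pvNatIdx ((b :: ws).map f) < (b :: ws).length := by
      have := pv_pvNatIdx_lt ((b :: ws).map f) hne
      simpa using this
    have hval : ((b :: ws).map f).getD (pvNatIdx ((b :: ws).map f)) 0 =
        f ((b :: ws).getD (pvNatIdx ((b :: ws).map f)) []) := by
      rw [List.getD_eq_getElem _ _ (by simpa using hlt), List.getD_eq_getElem _ _ hlt,
        List.getElem_map]
    rw [hmap, pv_pvNatIdx_append _ _ hne, hval, ih, List.foldl_append]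
    simp only [List.foldl_cons, List.foldl_nil, List.length_map]
    have hcons : (b :: (ws ++ [x])) = (b :: ws) ++ [x] := by simp
    by_cases h : f x < f (ws.foldl (fun best w => if f w < f best then w else best) b)
    · simp only [if_pos h]
      rw [hcons, List.getD_append_right _ _ _ _ (le_refl (b :: ws).length)]
      simp
    · simp only [if_neg h]
      rw [hcons, List.getD_append _ _ _ _ hlt]
      exact ih

-- B side: the head of a stable insertion sort is the FIRST argmin
lemma pv_insertBy_cons (bef : List Int → List Int → Bool) (x y : List Int) (ys : List (List Int)) :
    PySem.List.insertBy bef x (y :: ys) =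
      if bef x y then x :: y :: ys else y :: PySem.List.insertBy bef x ys := rfl

lemma pv_insertBy_nil (bef : List Int → List Int → Bool) (x : List Int) :
    PySem.List.insertBy bef x [] = [x] := rfl

lemma pv_sort_head (f : List Int → Int) (b : List Int) (vs : List (List Int)) :
    (vs.foldl (fun acc x => PySem.List.insertBy (fun a c => decide (f a < f c)) x acc) [b]).head? =
      some (vs.foldl (fun m w => if f w < f m then w else m) b) := by
  induction vs using List.reverseRecOn with
  | nil => rfl
  | append_singleton ws x ih =>
    rw [List.foldl_append, List.foldl_append]
    simp only [List.foldl_cons, List.foldl_nil]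
    set acc := ws.foldl (fun acc x => PySem.List.insertBy (fun a c => decide (f a < f c)) x acc) [b] with hacc
    set m := ws.foldl (fun m w => if f w < f m then w else m) b with hm
    cases hA : acc with
    | nil => rw [hA] at ih; simp at ih
    | cons h t =>
      rw [hA] at ih
      simp only [List.head?_cons, Option.some.injEq] at ih
      subst ih
      rw [pv_insertBy_cons]
      by_cases hlt : f x < f m
      · simp [hlt]
      · simp [hlt]

lemma pv_sorted_head (f : List Int → Int) (b : List Int) (vs : List (List Int)) :
    (PySem.List.sorted (b :: vs) f false).head? =
      some (vs.foldl (fun m w => if f w < f m then w else m) b) := by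
  rw [PySem.List.sorted_eq_foldl_insertBy, List.foldl_cons, pv_insertBy_nil]
  exact pv_sort_head f b vs

theorem pv_ports_eq (pacman : List Int) (vector : List (List Int)) (map_coast : List (List Int × Int)) :
    smaller_cost pacman vector map_coast = smaller_cost_alt pacman vector map_coast := by
  unfold smaller_cost smaller_cost_alt
  rw [pv_truncA, pv_truncB]
  cases hv : vector.take 80 with
  | nil => rfl
  | cons b vs =>
    have hne : (b :: vs) ≠ [] := by simp
    dsimp only
    rw [if_neg hne, if_neg hne]
    rw [pv_tablefix pacman (PySem.Dict.mk map_coast) (b :: vs)]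
    rw [pv_smaller_index_eq, PySem.List.pyGetD_natCast]
    set f : List Int → Int :=
      fun w => calc_dist pacman w * PySem.Dict.getD (PySem.Dict.mk map_coast) w 1 with hf
    have hhead := pv_sorted_head f b vs
    cases hS : PySem.List.sorted (b :: vs) f false with
    | nil => rw [hS] at hhead; simp at hhead
    | cons m t =>
      rw [hS] at hhead
      simp only [List.head?_cons, Option.some.injEq] at hhead
      have hget : PySem.List.pyGet? (m :: t) (0 : Int) = some m := by
        simp [PySem.List.pyGet?, PySem.List.pyIdx?]
      rw [hget, hhead]
      exact congrArg some (pv_argmin f b vs)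

-- ===== VERDICT (by name: the statement is the Claim_ definition above) =====
theorem smaller_cost_spec : Claim_equal_smaller_cost := by
  intro pacman vector map_coast _ _
  unfold Spec_smaller_cost
  exact pv_ports_eq pacman vector map_coast
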